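-- pv_equiv track=rewrite | github.com/daju01/VECM | vecm_project/scripts/parallel_run.py | _match_price_column
-- ===== SOURCE A (Python) =====
-- from typing import Any, Dict, Iterable, List, Optional
--
-- def _match_price_column(columns: Iterable[str], ticker: str) -> Optional[str]:
--     upper = [col.upper() for col in columns]
--     t = ticker.upper()
--     try:
--         idx = upper.index(t)
--         return list(columns)[idx]
--     except ValueError:
--         pass
--     suffix = f"{t}.JK"
--     if suffix in upper:
--         return list(columns)[upper.index(suffix)]
--     for col, col_upper in zip(columns, upper):
--         if col_upper.startswith(f"{t}."):
--             return col
--         if col_upper.endswith(f".{t}"):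
--             return col
--         if col_upper.replace("_", "").replace("-", "").endswith(t):
--             return col
--     return None
-- ===== SOURCE B (Python) =====
-- def _match_price_column(columns, ticker):
--     t = ticker.upper()
--     best_tier = 3
--     best_col = None
--     for col in columns:
--         u = col.upper()
--         if u == t:
--             tier = 0
--         elif u == t + ".JK":
--             tier = 1
--         elif (u.startswith(t + ".") or u.endswith("." + t)
--               or u.replace("_", "").replace("-", "").endswith(t)):
--             tier = 2
--         else:
--             continue
--         if tier < best_tier:
--             best_tier = tier
--             best_col = col
--             if tier == 0:
--                 break
--     return best_col
-- ===== Notes on version B (the rewrite author's own statement) =====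
-- stated objective: alternative
-- what changed: Replaces A's three separate scans (exact-match index pass, .JK membership+index pass, then a zip loop) by a single pass that classifies each column into a priority tier and keeps the first column of the lowest tier seen.
import Mathlib
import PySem

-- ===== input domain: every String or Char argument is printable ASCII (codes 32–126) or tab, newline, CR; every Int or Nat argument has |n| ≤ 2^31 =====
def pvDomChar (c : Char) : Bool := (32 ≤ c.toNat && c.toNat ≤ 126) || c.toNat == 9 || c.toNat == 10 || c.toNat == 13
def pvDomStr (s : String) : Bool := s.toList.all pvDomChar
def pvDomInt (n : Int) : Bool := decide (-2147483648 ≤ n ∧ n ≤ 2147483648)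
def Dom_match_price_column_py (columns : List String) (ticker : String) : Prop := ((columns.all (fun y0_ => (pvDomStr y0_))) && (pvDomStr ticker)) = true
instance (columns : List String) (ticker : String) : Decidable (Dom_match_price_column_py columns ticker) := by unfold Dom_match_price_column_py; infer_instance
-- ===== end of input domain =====

-- B replaces A's three separate scans (exact-index pass, .JK membership+index pass, zip loop)
-- by a single pass tracking the first column of the lowest priority tier; alternative decomposition, same O(n) cost.

-- ===== PORT A =====
-- the for-loop over zip(columns, upper): three sequential ifs, each returning col
def pvLoopA (t : String) : List (String × String) → Option String
  | [] => none
  | (col, colUpper) :: rest =>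
    if PySem.Str.startswith colUpper (t ++ ".") then some col
    else if PySem.Str.endswith colUpper ("." ++ t) then some col
    else if PySem.Str.endswith (PySem.Str.replace (PySem.Str.replace colUpper "_" "") "-" "") t then some col
    else pvLoopA t rest

def match_price_column_py (columns : List String) (ticker : String) : Option String :=
  let upper := columns.map PySem.Str.upper
  let t := PySem.Str.upper ticker
  match PySem.List.index? upper t with
  | some idx => PySem.List.pyGet? columns (idx : Int)     -- return list(columns)[idx]
  | none =>                                               -- except ValueError: pass
    let suffix := t ++ ".JK"
    if suffix ∈ upper then
      match PySem.List.index? upper suffix with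
      | some idx => PySem.List.pyGet? columns (idx : Int)
      | none => none                                      -- unreachable: membership was just checked
    else
      pvLoopA t (columns.zip upper)

-- ===== PORT B =====
-- single pass: best_tier/best_col accumulator, break on tier 0
def pvAltGo (t : String) : List String → Nat → Option String → Option String
  | [], _, bestCol => bestCol
  | col :: rest, bestTier, bestCol =>
    let u := PySem.Str.upper col
    let tier? : Option Nat :=
      if u == t then some 0
      else if u == t ++ ".JK" then some 1
      else if PySem.Str.startswith u (t ++ ".") || PySem.Str.endswith u ("." ++ t)
              || PySem.Str.endswith (PySem.Str.replace (PySem.Str.replace u "_" "") "-" "") t then some 2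
      else none
    match tier? with
    | none => pvAltGo t rest bestTier bestCol             -- continue
    | some tier =>
      if tier < bestTier then
        if tier = 0 then some col                         -- break, then return best_col = col
        else pvAltGo t rest tier (some col)
      else pvAltGo t rest bestTier bestCol

def match_price_column_py_alt (columns : List String) (ticker : String) : Option String :=
  pvAltGo (PySem.Str.upper ticker) columns 3 none

-- ===== PRECONDITION & SPEC =====
def Spec_match_price_column_py (columns : List String) (ticker : String) (out : Option String) : Prop := out = match_price_column_py_alt columns ticker
instance (columns : List String) (ticker : String) (out : Option String) : Decidable (Spec_match_price_column_py columns ticker out) := by unfold Spec_match_price_column_py; infer_instance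

-- ===== CLAIM (what is proved, stated in full; the proofs are below) =====
def Claim_equal_match_price_column_py : Prop := ∀ (columns : List String) (ticker : String), Dom_match_price_column_py columns ticker → Spec_match_price_column_py columns ticker (match_price_column_py columns ticker)

-- ===== LEMMAS AND PROOFS =====

-- tier predicates (proof-only)
def pvP0 (t c : String) : Bool := PySem.Str.upper c == t
def pvP1 (t c : String) : Bool := PySem.Str.upper c == t ++ ".JK"
def pvP2 (t c : String) : Bool :=
  PySem.Str.startswith (PySem.Str.upper c) (t ++ ".") || PySem.Str.endswith (PySem.Str.upper c) ("." ++ t)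
    || PySem.Str.endswith (PySem.Str.replace (PySem.Str.replace (PySem.Str.upper c) "_" "") "-" "") t
def pvG1 (t c : String) : Bool := !pvP0 t c && pvP1 t c
def pvG2 (t c : String) : Bool := !pvP0 t c && !pvP1 t c && pvP2 t c

-- the common "priority chain" both programs compute
def pvChain (t : String) (cs : List String) : Option String :=
  match cs.find? (pvP0 t) with
  | some c => some c
  | none =>
    match cs.find? (pvG1 t) with
    | some c => some c
    | none => cs.find? (pvG2 t)

theorem pvFind_congr {α : Type} (p q : α → Bool) (l : List α)
    (h : ∀ x ∈ l, p x = q x) : l.find? p = l.find? q := by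
  induction l with
  | nil => rfl
  | cons a l ih =>
    have ha := h a (by simp)
    by_cases hp : p a = true
    · rw [List.find?_cons_of_pos hp, List.find?_cons_of_pos (ha ▸ hp)]
    · rw [List.find?_cons_of_neg hp, List.find?_cons_of_neg (by rw [← ha]; exact hp),
        ih (fun x hx => h x (by simp [hx]))]

theorem pvIndexBind (v : String) (cs : List String) :
    ((PySem.List.index? (cs.map PySem.Str.upper) v).bind fun i => PySem.List.pyGet? cs (i : Int))
      = cs.find? (pvP0 v) := by
  induction cs with
  | nil => simp [PySem.List.index?]
  | cons c cs ih =>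
    by_cases h : PySem.Str.upper c = v
    · rw [List.map_cons, h, PySem.List.index?_cons_self,
        List.find?_cons_of_pos (show pvP0 v c = true by simp [pvP0, h])]
      simp
    · rw [List.map_cons, PySem.List.index?_cons_of_ne _ h,
        List.find?_cons_of_neg (by simp [pvP0, h])]
      rw [← ih]
      cases hidx : PySem.List.index? (cs.map PySem.Str.upper) v with
      | none => simp
      | some i =>
        simp only [Option.map_some, Option.bind_some]
        have : ((i + 1 : Nat) : Int) = (i : Int) + 1 := by push_cast; ring
        rw [this, PySem.List.pyGet?_cons_succ]

theorem pvLoopA_eq (t : String) (cs : List String) :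
    pvLoopA t (cs.zip (cs.map PySem.Str.upper)) = cs.find? (pvP2 t) := by
  induction cs with
  | nil => rfl
  | cons c cs ih =>
    by_cases h : pvP2 t c = true
    · rw [List.find?_cons_of_pos h]
      simp only [List.map_cons, List.zip_cons_cons, pvLoopA]
      split_ifs with hA hB hC
      · rfl
      · rfl
      · rfl
      · exfalso
        simp only [pvP2, Bool.or_eq_true] at h
        rcases h with (h | h) | h
        exacts [hA h, hB h, hC h]
    · rw [List.find?_cons_of_neg h, ← ih]
      simp only [pvP2, Bool.or_eq_true, not_or, Bool.not_eq_true] at h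
      simp only [List.map_cons, List.zip_cons_cons, pvLoopA]
      rw [h.1.1, h.1.2, h.2]
      simp

-- A computes the chain
theorem pvA_eq_chain (cs : List String) (t' : String) :
    match_price_column_py cs t' = pvChain (PySem.Str.upper t') cs := by
  set t := PySem.Str.upper t' with ht
  unfold match_price_column_py pvChain
  simp only [← ht]
  cases h0 : PySem.List.index? (cs.map PySem.Str.upper) t with
  | some idx =>
    have hb := pvIndexBind t cs
    rw [h0] at hb
    simp only [Option.bind_some] at hb
    rw [← hb]
    cases hg : PySem.List.pyGet? cs (idx : Int) with
    | some c => simp only [hg]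
    | none =>
      exfalso
      obtain ⟨hk, -, -⟩ := PySem.List.getElem_of_index?_eq_some h0
      rw [List.length_map] at hk
      rw [PySem.List.pyGet?_natCast] at hg
      simp [List.getElem?_eq_getElem hk] at hg
  | none =>
    have hb := pvIndexBind t cs
    rw [h0] at hb
    simp only [Option.bind_none] at hb
    rw [← hb]
    have hno0 : ∀ x ∈ cs, pvP0 t x = false := by
      intro x hx
      have := List.find?_eq_none.mp hb.symm x hx
      simpa using this
    by_cases hmem : (t ++ ".JK") ∈ cs.map PySem.Str.upper
    · simp only [if_pos hmem]
      cases h1 : PySem.List.index? (cs.map PySem.Str.upper) (t ++ ".JK") with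
      | none =>
        exfalso
        have := (PySem.List.index?_isSome_iff (cs.map PySem.Str.upper) (t ++ ".JK")).mpr hmem
        rw [h1] at this; simp at this
      | some j =>
        have hb1 := pvIndexBind (t ++ ".JK") cs
        rw [h1] at hb1
        simp only [Option.bind_some] at hb1
        have hcong : cs.find? (pvG1 t) = cs.find? (pvP0 (t ++ ".JK")) := by
          apply pvFind_congr
          intro x hx
          have h := hno0 x hx
          simp only [pvG1, pvP1, pvP0] at *
          rw [h]
          simp
        rw [hcong, ← hb1]
        cases hg : PySem.List.pyGet? cs (j : Int) with
        | some c => simp only [hg]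
        | none =>
          exfalso
          obtain ⟨hk, -, -⟩ := PySem.List.getElem_of_index?_eq_some h1
          rw [List.length_map] at hk
          rw [PySem.List.pyGet?_natCast] at hg
          simp [List.getElem?_eq_getElem hk] at hg
    · simp only [if_neg hmem]
      have hno1 : ∀ x ∈ cs, pvP1 t x = false := by
        intro x hx
        by_contra hc
        simp only [Bool.not_eq_false, pvP1, beq_iff_eq] at hc
        exact hmem (hc ▸ List.mem_map_of_mem hx)
      have hfg1 : cs.find? (pvG1 t) = none := by
        apply List.find?_eq_none.mpr
        intro x hx
        simp [pvG1, hno1 x hx]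
      rw [hfg1]
      rw [pvLoopA_eq]
      apply pvFind_congr
      intro x hx
      simp [pvG2, hno0 x hx, hno1 x hx]

-- B's loop computes the chain, generalized over the accumulator
theorem pvAltGo_eq (t : String) (cs : List String) :
    ∀ (bt : Nat) (bc : Option String), 1 ≤ bt →
    pvAltGo t cs bt bc =
      match cs.find? (pvP0 t) with
      | some c => some c
      | none =>
        if bt ≤ 1 then bc else
        match cs.find? (pvG1 t) with
        | some c => some c
        | none =>
          if bt ≤ 2 then bc else
          match cs.find? (pvG2 t) with
          | some c => some c
          | none => bc := by
  induction cs with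
  | nil =>
    intro bt bc _
    simp only [pvAltGo, List.find?_nil]
    split_ifs <;> rfl
  | cons c cs ih =>
    intro bt bc hbt
    by_cases h0 : pvP0 t c = true
    · have hu : (PySem.Str.upper c == t) = true := h0
      rw [List.find?_cons_of_pos h0]
      have h01 : (0 : Nat) < bt := hbt
      simp only [pvAltGo, hu, if_true, if_pos h01]
    · rw [List.find?_cons_of_neg h0]
      have hu0 : (PySem.Str.upper c == t) = false := by
        revert h0; unfold pvP0; cases (PySem.Str.upper c == t) <;> simp
      by_cases h1 : pvP1 t c = true
      · have hu1 : (PySem.Str.upper c == t ++ ".JK") = true := h1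
        have hg1 : pvG1 t c = true := by unfold pvG1 pvP0 pvP1; rw [hu0, hu1]; rfl
        rw [List.find?_cons_of_pos hg1]
        simp only [pvAltGo, hu0, hu1, Bool.false_eq_true, if_false, if_true]
        by_cases hb2 : 1 < bt
        · simp only [if_pos hb2]
          rw [ih 1 (some c) (le_refl 1)]
          cases hf0 : cs.find? (pvP0 t) <;> simp [show ¬ bt ≤ 1 by omega]
        · have hbeq : bt = 1 := by omega
          simp only [if_neg hb2]
          rw [ih bt bc hbt, hbeq]
          cases hf0 : cs.find? (pvP0 t) <;> simp
      · have hu1 : (PySem.Str.upper c == t ++ ".JK") = false := by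
          revert h1; unfold pvP1; cases (PySem.Str.upper c == t ++ ".JK") <;> simp
        have hg1f : pvG1 t c = false := by unfold pvG1 pvP1; rw [hu1]; simp
        rw [List.find?_cons_of_neg (by simp [hg1f])]
        by_cases h2 : (PySem.Str.startswith (PySem.Str.upper c) (t ++ ".")
            || PySem.Str.endswith (PySem.Str.upper c) ("." ++ t)
            || PySem.Str.endswith (PySem.Str.replace (PySem.Str.replace (PySem.Str.upper c) "_" "") "-" "") t) = true
        · have hg2 : pvG2 t c = true := by
            unfold pvG2 pvP0 pvP1 pvP2; rw [hu0, hu1, h2]; rfl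
          rw [List.find?_cons_of_pos hg2]
          simp only [pvAltGo, hu0, hu1]
          simp only [Bool.false_eq_true, if_false]
          have hcond : (PySem.Str.startswith (PySem.Str.upper c) (t ++ ".")
              || PySem.Str.endswith (PySem.Str.upper c) ("." ++ t)
              || PySem.Str.endswith (PySem.Str.replace (PySem.Str.replace (PySem.Str.upper c) "_" "") "-" "") t) = true := h2
          rw [hcond]
          simp only [if_true]
          by_cases hb3 : 2 < bt
          · simp only [if_pos hb3]
            rw [ih 2 (some c) (by omega)]
            cases hf0 : cs.find? (pvP0 t) <;> cases hf1 : cs.find? (pvG1 t) <;>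
              simp [show ¬ (2:Nat) ≤ 1 by omega, show ¬ bt ≤ 1 by omega, show ¬ bt ≤ 2 by omega]
          · simp only [if_neg hb3]
            rw [ih bt bc hbt]
            have hcase : bt = 1 ∨ bt = 2 := by omega
            rcases hcase with h | h <;> subst h <;>
              cases hf0 : cs.find? (pvP0 t) <;> cases hf1 : cs.find? (pvG1 t) <;> simp
        · have hcondf : (PySem.Str.startswith (PySem.Str.upper c) (t ++ ".")
              || PySem.Str.endswith (PySem.Str.upper c) ("." ++ t)
              || PySem.Str.endswith (PySem.Str.replace (PySem.Str.replace (PySem.Str.upper c) "_" "") "-" "") t) = false := by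
            revert h2
            cases hcc : (PySem.Str.startswith (PySem.Str.upper c) (t ++ ".")
              || PySem.Str.endswith (PySem.Str.upper c) ("." ++ t)
              || PySem.Str.endswith (PySem.Str.replace (PySem.Str.replace (PySem.Str.upper c) "_" "") "-" "") t) <;> simp
          have hg2f : pvG2 t c = false := by unfold pvG2 pvP2; rw [hcondf]; simp
          rw [List.find?_cons_of_neg (by simp [hg2f])]
          simp only [pvAltGo, hu0, hu1, hcondf]
          simp only [Bool.false_eq_true, if_false]
          exact ih bt bc hbt

theorem pvB_eq_chain (cs : List String) (t' : String) :
    match_price_column_py_alt cs t' = pvChain (PySem.Str.upper t') cs := by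
  unfold match_price_column_py_alt pvChain
  rw [pvAltGo_eq _ _ 3 none (by omega)]
  cases cs.find? (pvP0 (PySem.Str.upper t')) <;>
    cases cs.find? (pvG1 (PySem.Str.upper t')) <;>
    cases cs.find? (pvG2 (PySem.Str.upper t')) <;> simp

-- ===== VERDICT (by name: the statement is the Claim_ definition above) =====
theorem match_price_column_py_spec : Claim_equal_match_price_column_py := by
  intro columns ticker _
  unfold Spec_match_price_column_py
  rw [pvA_eq_chain, pvB_eq_chain]
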